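-- pv_equiv track=rewrite | github.com/PrashanthMadishetti/smart_rag_chatbot | smart-rag-backend/app/prompt/builder.py | _reduce_history_to_budget
-- ===== SOURCE A (Python) =====
-- from typing import Dict,Any,List,Optional,Tuple,Iterable
-- from typing import List, Optional, Dict, Any
--
-- def _size(s:str)->int:
--     return len(s or "")
--
-- def _render_history(history:Iterable[Tuple[str,str]]) -> str:
--     lines:List[str] = ["History:"]
--     for u,a in history:
--         if u:
--             lines.append(f"User: {u}")
--         if a:
--             lines.append(f"Assistant: {a}")
--     return "\n".join(lines)
--
-- def _reduce_history_to_budget(history:List[Tuple[str,str]],budget:int) -> List[Tuple[str,str]]: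
--     if not history:
--         return []
--     start = 0
--     while start < len(history):
--         rendered = _render_history(history[start:])
--         if _size(rendered) <= budget:
--             return history[start:]
--         start +=1
--     return []
-- ===== SOURCE B (Python) =====
-- def _reduce_history_to_budget(history, budget):
--     if not history:
--         return []
--     n = len(history)
--     # one backward pass: suffix[i] = total rendered size of the lines for history[i:]
--     suffix = [0] * n
--     total = 0
--     for i in range(n - 1, -1, -1):
--         u, a = history[i]
--         total += (7 + len(u) if u else 0) + (12 + len(a) if a else 0)
--         suffix[i] = total
--     # rendered size of history[i:] is 8 (for "History:") + suffix[i]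
--     for i in range(n):
--         if 8 + suffix[i] <= budget:
--             return history[i:]
--     return []
-- ===== Notes on version B (the rewrite author's own statement) =====
-- stated objective: faster
-- what changed: Replaces A's loop that re-renders the whole remaining history for every candidate start (quadratic in the total text) with one backward pass of suffix rendered-size sums plus a single forward scan for the earliest suffix that fits the budget.
import Mathlib
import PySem

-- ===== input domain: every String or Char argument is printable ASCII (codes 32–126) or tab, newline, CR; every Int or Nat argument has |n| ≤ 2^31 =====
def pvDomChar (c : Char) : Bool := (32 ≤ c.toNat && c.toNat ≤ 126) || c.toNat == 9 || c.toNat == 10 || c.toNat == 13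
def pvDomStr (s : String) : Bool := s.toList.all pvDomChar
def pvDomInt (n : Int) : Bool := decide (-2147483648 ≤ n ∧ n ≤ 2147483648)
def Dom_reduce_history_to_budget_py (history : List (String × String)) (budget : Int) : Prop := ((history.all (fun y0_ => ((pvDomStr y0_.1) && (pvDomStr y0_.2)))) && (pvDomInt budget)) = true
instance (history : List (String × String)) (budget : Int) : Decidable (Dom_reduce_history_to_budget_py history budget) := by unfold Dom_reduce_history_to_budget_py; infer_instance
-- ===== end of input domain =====

-- B replaces A's re-rendering of every suffix by one backward pass of suffix
-- rendered-size sums plus a forward scan (objective: faster, asymptotically).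

-- ===== PORT A =====
-- _size(s) = len(s or "")  (s is always a str here)
def pvSizeA (s : String) : Int := PySem.Str.len s

-- _render_history: build the lines list, join with "\n"
def pvRenderHistory (history : List (String × String)) : String :=
  let lines : List String := history.foldl (fun acc p =>
      let acc := if p.1 ≠ "" then acc ++ ["User: " ++ p.1] else acc
      if p.2 ≠ "" then acc ++ ["Assistant: " ++ p.2] else acc)
    ["History:"]
  PySem.Str.join "\n" lines

-- the 'while start < len(history)' loop of A
def pvLoopA (history : List (String × String)) (budget : Int) (start : Nat) :
    List (String × String) :=
  if _h : start < history.length then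
    let rendered := pvRenderHistory (PySem.List.slice history (some (start : Int)) none)
    if pvSizeA rendered ≤ budget then PySem.List.slice history (some (start : Int)) none
    else pvLoopA history budget (start + 1)
  else []
termination_by history.length - start

def reduce_history_to_budget_py (history : List (String × String)) (budget : Int) :
    List (String × String) :=
  if history = [] then [] else pvLoopA history budget 0

-- ===== PORT B =====
-- cost of one pair: its lines' contribution ("\n" + line) to the rendered string
def pvCost (p : String × String) : Int :=
  (if p.1 ≠ "" then 7 + PySem.Str.len p.1 else 0) +
  (if p.2 ≠ "" then 12 + PySem.Str.len p.2 else 0)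

-- backward pass: suffix[i] = pvCost history[i] + suffix[i+1]
def pvSuffix : List (String × String) → List Int
  | [] => []
  | p :: t =>
    let rest := pvSuffix t
    (pvCost p + rest.headD 0) :: rest

-- forward scan: first i with 8 + suffix[i] ≤ budget, return history[i:]
def pvScan : List (String × String) → List Int → Int → List (String × String)
  | _, [], _ => []
  | hs, s :: st, budget =>
    if 8 + s ≤ budget then hs else pvScan hs.tail st budget

def reduce_history_to_budget_py_alt (history : List (String × String)) (budget : Int) :
    List (String × String) :=
  if history = [] then [] else pvScan history (pvSuffix history) budget

-- ===== PRECONDITION & SPEC =====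
def Spec_reduce_history_to_budget_py (history : List (String × String)) (budget : Int) (out : List (String × String)) : Prop := out = reduce_history_to_budget_py_alt history budget
instance (history : List (String × String)) (budget : Int) (out : List (String × String)) : Decidable (Spec_reduce_history_to_budget_py history budget out) := by unfold Spec_reduce_history_to_budget_py; infer_instance

-- ===== CLAIM (what is proved, stated in full; the proofs are below) =====
def Claim_equal_reduce_history_to_budget_py : Prop := ∀ (history : List (String × String)) (budget : Int), Dom_reduce_history_to_budget_py history budget → Spec_reduce_history_to_budget_py history budget (reduce_history_to_budget_py history budget)

-- ===== LEMMAS AND PROOFS =====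

-- the lines one pair contributes
def pvPairLines (p : String × String) : List String :=
  (if p.1 ≠ "" then ["User: " ++ p.1] else []) ++
  (if p.2 ≠ "" then ["Assistant: " ++ p.2] else [])

def pvLines (l : List (String × String)) : List String := l.flatMap pvPairLines

-- Nat-valued cost of one pair (pvCost, on the Nat side)
def pvCostN (p : String × String) : Nat :=
  (if p.1 ≠ "" then 7 + p.1.toList.length else 0) +
  (if p.2 ≠ "" then 12 + p.2.toList.length else 0)

lemma pvFoldl_lines (l : List (String × String)) (acc : List String) :
    l.foldl (fun acc p =>
      let acc := if p.1 ≠ "" then acc ++ ["User: " ++ p.1] else acc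
      if p.2 ≠ "" then acc ++ ["Assistant: " ++ p.2] else acc) acc
      = acc ++ pvLines l := by
  induction l generalizing acc with
  | nil => simp [pvLines]
  | cons p t ih =>
    simp only [List.foldl_cons, ih, pvLines, List.flatMap_cons, pvPairLines]
    split_ifs <;> simp

def pvSumCost (l : List (String × String)) : Int := (l.map pvCost).sum

lemma pvJoin_len (sep : List Char) (x : List Char) (rest : List (List Char)) :
    (PySem.Chars.join sep (x :: rest)).length
      = x.length + (rest.map (fun y => sep.length + y.length)).sum := by
  induction rest generalizing x with
  | nil => simp [PySem.Chars.join_singleton]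
  | cons y t ih =>
    rw [PySem.Chars.join_cons_cons]
    simp [ih y]
    omega

lemma pvLines_natsum (l : List (String × String)) :
    (List.map ((fun y => ("\n" : String).toList.length + y.length) ∘ String.toList)
        (pvLines l)).sum = (l.map pvCostN).sum := by
  induction l with
  | nil => simp [pvLines]
  | cons p t ih =>
    simp only [pvLines, List.flatMap_cons, List.map_append, List.sum_append,
      List.map_cons, List.sum_cons] at *
    rw [ih]
    have h1 : ("User: " : String).toList.length = 6 := by decide
    have h2 : ("Assistant: " : String).toList.length = 11 := by decide
    have hn : ("\n" : String).toList.length = 1 := by decide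
    unfold pvPairLines pvCostN
    split_ifs <;>
      simp_all [String.toList_append] <;> omega

lemma pvCost_eq (p : String × String) : pvCost p = (pvCostN p : Int) := by
  unfold pvCost pvCostN
  split_ifs <;> simp [PySem.Str.len]

lemma pvSumCost_eq (l : List (String × String)) :
    pvSumCost l = ((l.map pvCostN).sum : Int) := by
  induction l with
  | nil => simp [pvSumCost]
  | cons p t ih =>
    simp only [pvSumCost, List.map_cons, List.sum_cons] at *
    rw [pvCost_eq, ih]
    push_cast; ring

lemma pvRender_len (l : List (String × String)) :
    pvSizeA (pvRenderHistory l) = 8 + pvSumCost l := by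
  unfold pvSizeA pvRenderHistory
  rw [pvFoldl_lines]
  rw [show PySem.Str.len = fun s => (s.toList.length : Int) by
    funext s; simp [PySem.Str.len]]
  simp only [PySem.Str.toList_join, List.map_cons, List.singleton_append]
  rw [pvJoin_len, List.map_map, pvLines_natsum]
  have h8 : ("History:" : String).toList.length = 8 := by decide
  rw [h8, pvSumCost_eq]
  push_cast; ring

lemma pvSuffix_headD (l : List (String × String)) :
    (pvSuffix l).headD 0 = pvSumCost l := by
  induction l with
  | nil => simp [pvSuffix, pvSumCost]
  | cons p t ih =>
    simp only [pvSuffix, List.headD_cons]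
    rw [ih]; simp [pvSumCost]

lemma pvLoopA_eq_scan (history : List (String × String)) (budget : Int) (start : Nat) :
    pvLoopA history budget start
      = pvScan (history.drop start) (pvSuffix (history.drop start)) budget := by
  by_cases h : start < history.length
  · rw [pvLoopA]
    simp only [h, dif_pos]
    rw [PySem.List.slice_from_natCast]
    obtain ⟨p, t, ht⟩ : ∃ p t, history.drop start = p :: t := by
      rcases hd : history.drop start with _ | ⟨p, t⟩
      · exfalso; have := List.drop_eq_nil_iff.mp hd; omega
      · exact ⟨p, t, rfl⟩
    have hcond : pvSizeA (pvRenderHistory (history.drop start)) ≤ budget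
        ↔ 8 + (pvCost p + (pvSuffix t).headD 0) ≤ budget := by
      rw [pvRender_len, ht, pvSuffix_headD]
      simp [pvSumCost]
    have htail : history.drop (start + 1) = t := by
      rw [← List.drop_drop, ht]; rfl
    rw [ht] at hcond
    rw [ht, pvSuffix]
    simp only [pvScan]
    by_cases hc : pvSizeA (pvRenderHistory (p :: t)) ≤ budget
    · rw [if_pos hc, if_pos (hcond.mp hc)]
    · rw [if_neg hc, if_neg (fun hx => hc (hcond.mpr hx))]
      rw [pvLoopA_eq_scan history budget (start + 1), htail]
      rfl
  · rw [pvLoopA]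
    simp only [h, dif_neg, not_false_iff]
    rw [List.drop_eq_nil_of_le (by omega), pvSuffix]
    rfl
termination_by history.length - start

-- ===== VERDICT (by name: the statement is the Claim_ definition above) =====
theorem reduce_history_to_budget_py_spec : Claim_equal_reduce_history_to_budget_py := by
  intro history budget _
  unfold Spec_reduce_history_to_budget_py reduce_history_to_budget_py reduce_history_to_budget_py_alt
  by_cases h : history = []
  · simp [h]
  · rw [if_neg h, if_neg h, pvLoopA_eq_scan, List.drop_zero]
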